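-- pv_equiv track=rewrite | github.com/GRISONRF/HackerRank-30daysofcode | practice/my-interview.py | step_index
-- ===== SOURCE A (Python) =====
-- def step_index(wordlist):
--
--     result = {}
--     #iterates over wordlist
--     for i in range(len(wordlist)):
--         #word 1
--         w1 = wordlist[i][0]
--         #add this word as a key to the result with an empty list as value
--         result[w1] = []
--
--         #iterate over the word list again
--         for j in range(len(wordlist)):
--             #if the indexes are the same, ignore
--             if i == j:
--                 continue
--             #sava the word into w2
--             w2 = wordlist[j][0]
--
--             #if len of both words dont have a 1 diff, ignore
--             if len(w2) - len(w1) != 1: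
--                 continue
--
--             #create lists using the words
--             w1_chars = list(w1)
--             w2_chars = list(w2)
--             #check if letters match
--             for c in w1_chars:
--                 if c in w2_chars:
--                     w2_chars.remove(c)
--                 else:
--                     break
--             #if for loop ran without encountering the break. means this is a valid result
--             else:
--                 result[w1].append(w2)
--
--     return result
-- ===== SOURCE B (Python) =====
-- def step_index(wordlist):
--     # Build an index: for each word w, hash every length-(L-1) sorted-deletion
--     # key of w to w.  Then each word's answer is one O(L log L) lookup.
--     index = {}
--     for entry in wordlist:
--         w2 = entry[0]
--         s = sorted(w2)
--         seen = set()
--         for k in range(len(s)):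
--             key = ''.join(s[:k] + s[k + 1:])
--             if key not in seen:
--                 seen.add(key)
--                 index.setdefault(key, []).append(w2)
--     result = {}
--     for entry in wordlist:
--         w1 = entry[0]
--         result[w1] = list(index.get(''.join(sorted(w1)), []))
--     return result
-- ===== Notes on version B (the rewrite author's own statement) =====
-- stated objective: faster
-- what changed: Replaces the all-pairs scan with remove-loop matching by a hash index mapping every sorted one-char-deletion key of each word to that word, so each word's list is a single sorted-key lookup.
import Mathlib
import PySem

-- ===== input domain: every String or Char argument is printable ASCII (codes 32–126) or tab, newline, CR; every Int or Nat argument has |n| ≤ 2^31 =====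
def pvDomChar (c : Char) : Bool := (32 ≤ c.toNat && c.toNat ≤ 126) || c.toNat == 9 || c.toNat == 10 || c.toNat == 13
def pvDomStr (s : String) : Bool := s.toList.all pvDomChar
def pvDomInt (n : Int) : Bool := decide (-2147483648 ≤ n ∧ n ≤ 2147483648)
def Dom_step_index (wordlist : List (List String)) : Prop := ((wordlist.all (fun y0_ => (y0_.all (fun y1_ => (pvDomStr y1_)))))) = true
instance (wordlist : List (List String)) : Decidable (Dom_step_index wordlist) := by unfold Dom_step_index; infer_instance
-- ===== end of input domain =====

-- B replaces A's all-pairs scan by a hash index keyed on sorted one-char-deletion multisets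
-- (objective: faster — one index build plus one lookup per word instead of a quadratic scan).

-- ===== PORT A =====
-- the inner for-c-in-w1_chars loop with its for/else: remove each char of w1 from w2's chars,
-- False as soon as one is missing ('c in w2_chars' + 'w2_chars.remove(c)' = contains + erase, both first-occurrence)
def chkLoop : List Char → List Char → Bool
  | [], _ => true
  | c :: cs, w2c => if w2c.contains c then chkLoop cs (w2c.erase c) else false

-- body of 'for j in range(len(wordlist))'
def innerBodyA (wordlist : List (List String)) (i : Nat) (w1 : String)
    (result : PySem.Dict String (List String)) (j : Nat) : PySem.Dict String (List String) :=
  if i == j then result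
  else
    -- wordlist[j][0]: j is in range; the inner [0] needs Pre_ (nonempty entries)
    let w2 := PySem.List.pyGetD (PySem.List.pyGetD wordlist (j : Int) []) 0 ""
    if ¬ (PySem.Str.len w2 - PySem.Str.len w1 = 1) then result
    else if chkLoop w1.toList w2.toList then result.modify w1 [] (fun l => l ++ [w2])
    else result

-- body of 'for i in range(len(wordlist))'
def outerBodyA (wordlist : List (List String))
    (result : PySem.Dict String (List String)) (i : Nat) : PySem.Dict String (List String) :=
  let w1 := PySem.List.pyGetD (PySem.List.pyGetD wordlist (i : Int) []) 0 ""
  (List.range wordlist.length).foldl (innerBodyA wordlist i w1) (result.insert w1 [])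

def step_index (wordlist : List (List String)) : List (String × List String) :=
  ((List.range wordlist.length).foldl (outerBodyA wordlist) PySem.Dict.empty).items

-- ===== PORT B =====
-- keys are List Char: ''.join(cs) is a bijective renaming of the char list cs, so the dict behaves identically
-- body of 'for k in range(len(s))': key = s[:k] + s[k+1:]; skip if seen, else
-- 'index.setdefault(key, []).append(w2)' = overwrite-in-place with the extended list
def innerBodyB (w2 : String) (s : List Char)
    (p : PySem.Dict (List Char) (List String) × PySem.Set (List Char)) (k : Nat) :
    PySem.Dict (List Char) (List String) × PySem.Set (List Char) :=
  let key := PySem.List.slice s none (some (k : Int)) ++ PySem.List.slice s (some ((k : Int) + 1)) none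
  if p.2.contains key then p
  else (p.1.insert key (p.1.getD key [] ++ [w2]), PySem.Set.add p.2 key)

-- first loop: build the deletion-key index
def buildIndexB (wordlist : List (List String)) : PySem.Dict (List Char) (List String) :=
  wordlist.foldl (fun index entry =>
    let w2 := PySem.List.pyGetD entry 0 ""
    let s := PySem.List.sorted w2.toList (fun c => c)
    ((List.range s.length).foldl (innerBodyB w2 s) (index, PySem.Set.empty)).1)
    PySem.Dict.empty

def step_index_alt (wordlist : List (List String)) : List (String × List String) :=
  let index := buildIndexB wordlist
  (wordlist.foldl (fun (result : PySem.Dict String (List String)) entry =>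
    let w1 := PySem.List.pyGetD entry 0 ""
    result.insert w1 (index.getD (PySem.List.sorted w1.toList (fun c => c)) []))
    PySem.Dict.empty).items

-- ===== PRECONDITION & SPEC =====
-- Pre_ excludes inputs with an empty inner list: there Python's wordlist[i][0] raises IndexError (in A and in B alike).
def Pre_step_index (wordlist : List (List String)) : Prop := ∀ entry ∈ wordlist, entry ≠ []
instance (wordlist : List (List String)) : Decidable (Pre_step_index wordlist) := by unfold Pre_step_index; infer_instance
def pvWitness_step_index : List (List String) := [["ab"], ["cab"], ["x"]]

def Spec_step_index (wordlist : List (List String)) (out : List (String × List String)) : Prop := out = step_index_alt wordlist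
instance (wordlist : List (List String)) (out : List (String × List String)) : Decidable (Spec_step_index wordlist out) := by unfold Spec_step_index; infer_instance

-- ===== CLAIM (what is proved, stated in full; the proofs are below) =====
def Claim_equal_step_index : Prop := ∀ (wordlist : List (List String)), Dom_step_index wordlist → Pre_step_index wordlist → Spec_step_index wordlist (step_index wordlist)

-- ===== LEMMAS AND PROOFS =====

-- proof-side vocabulary
def wordOf (entry : List String) : String := PySem.List.pyGetD entry 0 ""
def wordsOf (wl : List (List String)) : List String := wl.map wordOf
def wAt (wl : List (List String)) (j : Nat) : String := wordOf (wl.getD j [])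
def condA (w1 w2 : String) : Bool :=
  decide (PySem.Str.len w2 - PySem.Str.len w1 = 1) && chkLoop w1.toList w2.toList
def sortc (w : String) : List Char := PySem.List.sorted w.toList (fun c => c)
def delKeys (s : List Char) : List (List Char) :=
  (List.range s.length).map (fun k => s.take k ++ s.drop (k + 1))
def condB (w1 w2 : String) : Bool := (delKeys (sortc w2)).contains (sortc w1)
def FA (wl : List (List String)) (w1 : String) : List String := (wordsOf wl).filter (condA w1)

lemma set_contains_iff {α : Type} [BEq α] [LawfulBEq α] (s : PySem.Set α) (x : α) :
    PySem.Set.contains s x = decide (x ∈ s) := by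
  simp [PySem.Set.contains]

lemma words_eq_map_range (wl : List (List String)) :
    wordsOf wl = (List.range wl.length).map (wAt wl) := by
  apply List.ext_getElem
  · simp [wordsOf]
  · intro i h1 h2
    simp only [wordsOf, List.length_map] at h1
    simp [wordsOf, wAt, List.getD_eq_getElem?_getD, List.getElem?_eq_getElem h1]

lemma cons_le_iff_erase (a : Char) (s t : Multiset Char) (h : a ∈ t) : (s ≤ t.erase a) ↔ (a ::ₘ s ≤ t) := by
  constructor
  · intro hle
    have := Multiset.cons_le_cons a hle
    rwa [Multiset.cons_erase h] at this
  · intro hle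
    rw [← Multiset.cons_erase h] at hle
    exact (Multiset.cons_le_cons_iff a).mp hle

lemma chk_iff (l1 l2 : List Char) :
    chkLoop l1 l2 = true ↔ (l1 : Multiset Char) ≤ (l2 : Multiset Char) := by
  induction l1 generalizing l2 with
  | nil => simp [chkLoop]
  | cons c cs ih =>
    rw [chkLoop]
    by_cases hc : l2.contains c
    · rw [if_pos hc, ih]
      have hmem : c ∈ l2 := by simpa using hc
      have : ((l2.erase c : List Char) : Multiset Char) = (l2 : Multiset Char).erase c :=
        (Multiset.coe_erase l2 c).symm
      rw [this, cons_le_iff_erase c _ _ (by simpa using hmem)]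
      simp
    · rw [if_neg hc]
      simp only [Bool.false_eq_true, false_iff]
      intro hle
      have hmem : c ∈ (l2 : Multiset Char) := Multiset.mem_of_le hle (by simp)
      simp at hmem hc
      exact hc hmem

lemma key_iff (l1 l2 : List Char) :
    ((l2.length : Int) - (l1.length : Int) = 1 ∧ (l1 : Multiset Char) ≤ (l2 : Multiset Char)) ↔
      (PySem.List.sorted l1 (fun c => c)) ∈ delKeys (PySem.List.sorted l2 (fun c => c)) := by
  set st := PySem.List.sorted l1 (fun c : Char => c) with hst
  set ss := PySem.List.sorted l2 (fun c : Char => c) with hss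
  have hp1 : st.Perm l1 := PySem.List.sorted_perm l1 _ false
  have hp2 : ss.Perm l2 := PySem.List.sorted_perm l2 _ false
  have hm1 : (st : Multiset Char) = (l1 : Multiset Char) := Multiset.coe_eq_coe.mpr hp1
  have hm2 : (ss : Multiset Char) = (l2 : Multiset Char) := Multiset.coe_eq_coe.mpr hp2
  have hw1 : List.Pairwise (fun a b : Char => a ≤ b) st := by
    simpa using PySem.List.sorted_pairwise l1 (fun c : Char => c)
  have hw2 : List.Pairwise (fun a b : Char => a ≤ b) ss := by
    simpa using PySem.List.sorted_pairwise l2 (fun c : Char => c)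
  have hlen1 : st.length = l1.length := hp1.length_eq
  have hlen2 : ss.length = l2.length := hp2.length_eq
  constructor
  · rintro ⟨hlen, hle⟩
    have hle' : (st : Multiset Char) ≤ (ss : Multiset Char) := by rw [hm1, hm2]; exact hle
    obtain ⟨u, hu⟩ := Multiset.le_iff_exists_add.mp hle'
    have hcard : u.card = 1 := by
      have := congrArg Multiset.card hu
      simp [Multiset.coe_card, hlen1, hlen2] at this
      omega
    obtain ⟨c, rfl⟩ := Multiset.card_eq_one.mp hcard
    have hss_eq : (ss : Multiset Char) = c ::ₘ (st : Multiset Char) := by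
      rw [hu, add_comm, Multiset.singleton_add]
    have hcmem : c ∈ ss := by
      have : c ∈ (ss : Multiset Char) := by rw [hss_eq]; simp
      simpa using this
    obtain ⟨k, hk, hsk⟩ := List.mem_iff_getElem.mp hcmem
    have hperm : List.Perm ss (c :: ss.eraseIdx k) := by
      have := (List.getElem_cons_eraseIdx_perm hk).symm
      rwa [hsk] at this
    have hdel_m : ((ss.eraseIdx k : List Char) : Multiset Char) = (st : Multiset Char) := by
      have h1 : (ss : Multiset Char) = c ::ₘ ((ss.eraseIdx k : List Char) : Multiset Char) := by
        rw [Multiset.coe_eq_coe.mpr hperm]; rfl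
      have := h1.symm.trans hss_eq
      exact (Multiset.cons_inj_right c).mp this
    have hpw_del : List.Pairwise (fun a b : Char => a ≤ b) (ss.eraseIdx k) :=
      List.Pairwise.sublist (List.eraseIdx_sublist ss k) hw2
    have hst_eq : st = ss.eraseIdx k :=
      PySem.List.eq_of_perm_of_pairwise_le_of_injective (fun c : Char => c)
        Function.injective_id (Multiset.coe_eq_coe.mp hdel_m).symm hw1 hpw_del
    rw [delKeys, List.mem_map]
    refine ⟨k, by simp [hk], ?_⟩
    rw [← List.eraseIdx_eq_take_drop_succ, ← hst_eq]
  · intro hmem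
    rw [delKeys, List.mem_map] at hmem
    obtain ⟨k, hkmem, heq⟩ := hmem
    rw [List.mem_range] at hkmem
    rw [← List.eraseIdx_eq_take_drop_succ] at heq
    have hlen_del : (ss.eraseIdx k).length = ss.length - 1 := by
      rw [List.length_eraseIdx_of_lt hkmem]
    have hlen_st : st.length = ss.length - 1 := by rw [← heq, hlen_del]
    constructor
    · have h1 : l1.length = l2.length - 1 := by omega
      have h2 : 1 ≤ l2.length := by omega
      omega
    · have hsub : ((ss.eraseIdx k : List Char) : Multiset Char) ≤ (ss : Multiset Char) :=
        Multiset.coe_le.mpr (List.eraseIdx_sublist ss k).subperm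
    
      rw [← hm1, ← hm2, ← heq]
      exact hsub

lemma condA_eq_condB (w1 w2 : String) : condA w1 w2 = condB w1 w2 := by
  rw [Bool.eq_iff_iff]
  rw [condA, Bool.and_eq_true, decide_eq_true_iff, chk_iff]
  rw [PySem.Str.len_eq, PySem.Str.len_eq]
  rw [key_iff w1.toList w2.toList]
  rw [condB, sortc, sortc]
  simp

lemma condA_self (w : String) : condA w w = false := by
  simp [condA]

lemma innerBodyA_eq (wl : List (List String)) (i : Nat) (w1 : String)
    (r : PySem.Dict String (List String)) (j : Nat) :
    innerBodyA wl i w1 r j =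
      if (!(i == j) && condA w1 (wAt wl j)) then r.modify w1 [] (fun l => l ++ [wAt wl j]) else r := by
  have hw : PySem.List.pyGetD (PySem.List.pyGetD wl (j : Int) []) 0 "" = wAt wl j := by
    simp [wAt, wordOf, PySem.List.pyGetD_natCast]
  simp only [innerBodyA, hw, condA]
  by_cases h1 : i == j <;> by_cases h2 : PySem.Str.len (wAt wl j) - PySem.Str.len w1 = 1 <;>
    by_cases h3 : chkLoop w1.toList (wAt wl j).toList <;> simp [h1, h2, h3]

lemma innerA_getD (wl : List (List String)) (i : Nat) (w1 : String) (js : List Nat)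
    (e : PySem.Dict String (List String)) (he : e.contains w1 = true) (key : String) :
    (js.foldl (innerBodyA wl i w1) e).getD key [] =
      if key = w1 then
        e.getD w1 [] ++ (js.filter (fun j => !(i == j) && condA w1 (wAt wl j))).map (wAt wl)
      else e.getD key [] := by
  induction js generalizing e with
  | nil => simp; intro h; rw [h]
  | cons j js ih =>
    simp only [List.foldl_cons, innerBodyA_eq]
    by_cases hj : (!(i == j) && condA w1 (wAt wl j)) = true
    · rw [if_pos hj]
      rw [ih _ (by simp [PySem.Dict.contains_modify, he])]
      by_cases hk : key = w1 <;>
        simp [hk, hj, PySem.Dict.getD_modify, List.append_assoc]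
    · rw [if_neg hj, ih _ he]
      rw [Bool.not_eq_true] at hj
      by_cases hk : key = w1 <;> simp [hk, hj]

lemma innerA_keys (wl : List (List String)) (i : Nat) (w1 : String) (js : List Nat)
    (e : PySem.Dict String (List String)) (he : e.contains w1 = true) :
    (js.foldl (innerBodyA wl i w1) e).keys = e.keys := by
  induction js generalizing e with
  | nil => simp
  | cons j js ih =>
    simp only [List.foldl_cons, innerBodyA_eq]
    by_cases hj : (!(i == j) && condA w1 (wAt wl j)) = true
    · rw [if_pos hj, ih _ (by simp [PySem.Dict.contains_modify, he])]
      rw [PySem.Dict.modify, PySem.Dict.keys_insert_of_contains _ _ he]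
    · rw [if_neg hj, ih _ he]

lemma matched_eq_FA (wl : List (List String)) (i : Nat) :
    ((List.range wl.length).filter (fun j => !(i == j) && condA (wAt wl i) (wAt wl j))).map (wAt wl) =
      FA wl (wAt wl i) := by
  rw [FA, words_eq_map_range, List.filter_map]
  congr 1
  apply List.filter_congr
  intro j hj
  simp only [Function.comp]
  by_cases h : i = j
  · subst h; simp [condA_self]
  · simp [Ne, h]

lemma keys_insert_add {κ ν : Type} [BEq κ] [LawfulBEq κ] (d : PySem.Dict κ ν) (k : κ) (v : ν) :
    (d.insert k v).keys = PySem.Set.add d.keys k := by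
  by_cases h : d.contains k = true
  · rw [PySem.Dict.keys_insert_of_contains d v h, PySem.Set.add, set_contains_iff]
    simp [(PySem.Dict.contains_iff_mem_keys d k).mp h]
  · rw [Bool.not_eq_true] at h
    rw [PySem.Dict.keys_insert_of_not_contains d v h, PySem.Set.add, set_contains_iff]
    have : ¬ k ∈ d.keys := fun hm => by
      simp [(PySem.Dict.contains_iff_mem_keys d k).mpr hm] at h
    simp [this]

lemma outerA_getD (wl : List (List String)) (js : List Nat)
    (d : PySem.Dict String (List String)) (key : String) :
    (js.foldl (outerBodyA wl) d).getD key [] =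
      if (js.map (wAt wl)).contains key then FA wl key else d.getD key [] := by
  induction js generalizing d with
  | nil => simp
  | cons j js ih =>
    simp only [List.foldl_cons, ih]
    have hstep : ∀ k, (outerBodyA wl d j).getD k [] =
        if k = wAt wl j then FA wl (wAt wl j) else d.getD k [] := by
      intro k
      have hw : PySem.List.pyGetD (PySem.List.pyGetD wl (j : Int) []) 0 "" = wAt wl j := by
        simp [wAt, wordOf, PySem.List.pyGetD_natCast]
      rw [outerBodyA]
      simp only [hw]
      rw [innerA_getD wl j (wAt wl j) _ _ (PySem.Dict.contains_insert_self d _ [])]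
      rw [matched_eq_FA]
      by_cases hk : k = wAt wl j
      · simp [hk, PySem.Dict.getD_insert]
      · simp [hk, PySem.Dict.getD_insert]
    by_cases hmem : (js.map (wAt wl)).contains key = true
    · rw [if_pos hmem, List.map_cons, List.contains_cons, hmem, Bool.or_true, if_pos rfl]
    · rw [Bool.not_eq_true] at hmem
      rw [if_neg (by rw [hmem]; simp), hstep, List.map_cons, List.contains_cons, hmem, Bool.or_false]
      by_cases hk : key = wAt wl j
      · subst hk; simp
      · have hb : (key == wAt wl j) = false := by simp [hk]
        rw [hb]; simp [hk]

lemma outerA_keys (wl : List (List String)) (js : List Nat) (d : PySem.Dict String (List String)) :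
    (js.foldl (outerBodyA wl) d).keys = PySem.Set.update d.keys (js.map (wAt wl)) := by
  induction js generalizing d with
  | nil => simp [PySem.Set.update]
  | cons j js ih =>
    simp only [List.foldl_cons, ih, List.map_cons]
    have hkeys : (outerBodyA wl d j).keys = PySem.Set.add d.keys (wAt wl j) := by
      have hw : PySem.List.pyGetD (PySem.List.pyGetD wl (j : Int) []) 0 "" = wAt wl j := by
        simp [wAt, wordOf, PySem.List.pyGetD_natCast]
      rw [outerBodyA]
      simp only [hw]
      rw [innerA_keys wl j (wAt wl j) _ _ (PySem.Dict.contains_insert_self d _ [])]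
      exact keys_insert_add d _ []
    rw [hkeys, PySem.Set.update, PySem.Set.update, List.foldl_cons]

lemma innerB_fold_getD (w2 : String) (keys : List (List Char))
    (idx0 idx : PySem.Dict (List Char) (List String)) (seen : PySem.Set (List Char))
    (h : ∀ key, idx.getD key [] = idx0.getD key [] ++ (if key ∈ seen then [w2] else []))
    (key : List Char) :
    ((keys.foldl (fun p key =>
        if p.2.contains key then p
        else (p.1.insert key (p.1.getD key [] ++ [w2]), PySem.Set.add p.2 key)) (idx, seen)).1).getD key [] =
      idx0.getD key [] ++ (if (key ∈ seen ∨ key ∈ keys) then [w2] else []) := by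
  induction keys generalizing idx seen with
  | nil => simpa using h key
  | cons k0 keys ih =>
    simp only [List.foldl_cons]
    by_cases hc : k0 ∈ seen
    · have hcb : PySem.Set.contains seen k0 = true := by
        rw [set_contains_iff]; simpa using hc
      rw [if_pos hcb]
      rw [ih idx seen h]
      have hiff : (key ∈ seen ∨ key ∈ keys) ↔ (key ∈ seen ∨ key ∈ k0 :: keys) := by
        by_cases hk : key = k0
        · subst hk; simp [hc]
        · simp [List.mem_cons, hk]
      rw [if_congr hiff rfl rfl]
    · have hcb : PySem.Set.contains seen k0 = false := by
        rw [set_contains_iff]; simpa using hc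
      rw [if_neg (by rw [hcb]; simp)]
      have h' : ∀ key, (idx.insert k0 (idx.getD k0 [] ++ [w2])).getD key [] =
          idx0.getD key [] ++ (if key ∈ PySem.Set.add seen k0 then [w2] else []) := by
        intro key
        rw [PySem.Dict.getD_insert]
        by_cases hk : key = k0
        · subst hk
          rw [if_pos rfl, h key]
          simp [PySem.Set.mem_add, hc]
        · rw [if_neg hk, h key]
          have hiff : key ∈ PySem.Set.add seen k0 ↔ key ∈ seen := by
            simp [PySem.Set.mem_add, hk]
          rw [if_congr hiff rfl rfl]
      rw [ih _ _ h']
      have hiff : (key ∈ PySem.Set.add seen k0 ∨ key ∈ keys) ↔ (key ∈ seen ∨ key ∈ k0 :: keys) := by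
        simp [PySem.Set.mem_add, List.mem_cons]
        tauto
      rw [if_congr hiff rfl rfl]

lemma innerB_range_eq (w2 : String) (s : List Char)
    (p : PySem.Dict (List Char) (List String) × PySem.Set (List Char)) :
    (List.range s.length).foldl (innerBodyB w2 s) p =
      (delKeys s).foldl (fun p key =>
        if p.2.contains key then p
        else (p.1.insert key (p.1.getD key [] ++ [w2]), PySem.Set.add p.2 key)) p := by
  rw [delKeys, List.foldl_map]
  apply PySem.List.foldl_congr_mem
  intro acc k _
  have h1 : PySem.List.slice s none (some (k : Int)) = s.take k := PySem.List.slice_to_natCast s k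
  have h2 : PySem.List.slice s (some ((k : Int) + 1)) none = s.drop (k + 1) := by
    have : ((k : Int) + 1) = ((k + 1 : Nat) : Int) := by push_cast; ring
    rw [this, PySem.List.slice_from_natCast]
  simp only [innerBodyB, h1, h2]

lemma buildIndexB_getD (l : List (List String)) (idx : PySem.Dict (List Char) (List String))
    (key : List Char) :
    (l.foldl (fun index entry =>
        let w2 := PySem.List.pyGetD entry 0 ""
        let s := PySem.List.sorted w2.toList (fun c => c)
        ((List.range s.length).foldl (innerBodyB w2 s) (index, PySem.Set.empty)).1) idx).getD key [] =
      idx.getD key [] ++ (wordsOf l).filter (fun w2 => (delKeys (sortc w2)).contains key) := by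
  induction l generalizing idx with
  | nil => simp [wordsOf]
  | cons e l ih =>
    simp only [List.foldl_cons]
    rw [ih]
    have hstart : ∀ k, idx.getD k [] = idx.getD k [] ++
        (if k ∈ (PySem.Set.empty : PySem.Set (List Char)) then [PySem.List.pyGetD e 0 ""] else []) := by
      intro k; simp [PySem.Set.empty]
    rw [innerB_range_eq, innerB_fold_getD _ _ idx idx PySem.Set.empty hstart key]
    have hw : wordsOf (e :: l) = wordOf e :: wordsOf l := by simp [wordsOf]
    rw [hw, List.filter_cons]
    have hs : sortc (wordOf e) = PySem.List.sorted (PySem.List.pyGetD e 0 "").toList (fun c => c) := by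
      simp [sortc, wordOf]
    have hmem : key ∈ (PySem.Set.empty : PySem.Set (List Char)) ∨
        key ∈ delKeys (PySem.List.sorted (PySem.List.pyGetD e 0 "").toList (fun c => c)) ↔
        (delKeys (sortc (wordOf e))).contains key = true := by
      rw [hs]
      simp [PySem.Set.empty]
    by_cases hb : (delKeys (sortc (wordOf e))).contains key = true
    · rw [if_pos (hmem.mpr hb), hb]
      simp [wordOf]
    · rw [Bool.not_eq_true] at hb
      rw [if_neg (fun hh => Bool.false_ne_true (hb ▸ hmem.mp hh)), hb]
      simp

lemma resB_getD (idx : PySem.Dict (List Char) (List String)) (l : List (List String))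
    (d : PySem.Dict String (List String)) (key : String) :
    (l.foldl (fun (result : PySem.Dict String (List String)) entry =>
        result.insert (PySem.List.pyGetD entry 0 "")
          (idx.getD (PySem.List.sorted (PySem.List.pyGetD entry 0 "").toList (fun c => c)) [])) d).getD key [] =
      if (wordsOf l).contains key then idx.getD (sortc key) [] else d.getD key [] := by
  induction l generalizing d with
  | nil => simp [wordsOf]
  | cons e l ih =>
    simp only [List.foldl_cons]
    rw [ih]
    have hw : wordsOf (e :: l) = wordOf e :: wordsOf l := by simp [wordsOf]
    rw [hw]
    by_cases hmem : (wordsOf l).contains key = true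
    · rw [if_pos hmem, List.contains_cons, hmem, Bool.or_true, if_pos rfl]
    · rw [Bool.not_eq_true] at hmem
      rw [if_neg (by rw [hmem]; simp), List.contains_cons, hmem, Bool.or_false]
      rw [PySem.Dict.getD_insert]
      by_cases hk : key = wordOf e
      · have hb : (key == wordOf e) = true := by simp [hk]
        rw [hb, if_pos rfl]
        subst hk
        simp [wordOf, sortc]
      · have hb : (key == wordOf e) = false := by simp [hk]
        rw [hb, if_neg (by simp [wordOf] at hk ⊢; exact hk)]
        simp

lemma resB_keys (idx : PySem.Dict (List Char) (List String)) (l : List (List String))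
    (d : PySem.Dict String (List String)) :
    (l.foldl (fun (result : PySem.Dict String (List String)) entry =>
        result.insert (PySem.List.pyGetD entry 0 "")
          (idx.getD (PySem.List.sorted (PySem.List.pyGetD entry 0 "").toList (fun c => c)) [])) d).keys =
      PySem.Set.update d.keys (l.map wordOf) := by
  induction l generalizing d with
  | nil => simp [PySem.Set.update]
  | cons e l ih =>
    simp only [List.foldl_cons]
    rw [ih, keys_insert_add, List.map_cons, PySem.Set.update, PySem.Set.update, List.foldl_cons]
    rfl

lemma indexB_getD_eq_FA (wl : List (List String)) (key : String) :
    (buildIndexB wl).getD (sortc key) [] = FA wl key := by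
  rw [buildIndexB, buildIndexB_getD]
  have h0 : (PySem.Dict.empty : PySem.Dict (List Char) (List String)).getD (sortc key) [] = [] := by
    simp [PySem.Dict.getD_empty]
  rw [h0, List.nil_append]
  have h1 : (fun w2 => (delKeys (sortc w2)).contains (sortc key)) = condB key := rfl
  rw [h1, FA]
  exact List.filter_congr (fun w2 _ => (condA_eq_condB key w2).symm)

lemma final_getD_eq (wl : List (List String)) (key : String) :
    ((List.range wl.length).foldl (outerBodyA wl) PySem.Dict.empty).getD key [] =
      ((wl.foldl (fun (result : PySem.Dict String (List String)) entry =>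
        result.insert (PySem.List.pyGetD entry 0 "")
          ((buildIndexB wl).getD (PySem.List.sorted (PySem.List.pyGetD entry 0 "").toList (fun c => c)) []))
        PySem.Dict.empty)).getD key [] := by
  rw [outerA_getD, ← words_eq_map_range, resB_getD, indexB_getD_eq_FA]

lemma final_keys_eq (wl : List (List String)) :
    ((List.range wl.length).foldl (outerBodyA wl) PySem.Dict.empty).keys =
      ((wl.foldl (fun (result : PySem.Dict String (List String)) entry =>
        result.insert (PySem.List.pyGetD entry 0 "")
          ((buildIndexB wl).getD (PySem.List.sorted (PySem.List.pyGetD entry 0 "").toList (fun c => c)) []))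
        PySem.Dict.empty)).keys := by
  rw [outerA_keys, ← words_eq_map_range, resB_keys]
  rfl

lemma final_keys_nodupA (wl : List (List String)) :
    ((List.range wl.length).foldl (outerBodyA wl) PySem.Dict.empty).keys.Nodup := by
  rw [outerA_keys]
  have h : (PySem.Dict.empty : PySem.Dict String (List String)).keys = [] := by
    simp [PySem.Dict.keys_empty]
  rw [h, PySem.Set.update_nil_left]
  exact PySem.Set.nodup_ofList _

-- ===== VERDICT (by name: the statement is the Claim_ definition above) =====
theorem step_index_spec : Claim_equal_step_index := by
  intro wl _ _
  unfold Spec_step_index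
  simp only [step_index, step_index_alt]
  have hB : ((wl.foldl (fun (result : PySem.Dict String (List String)) entry =>
      result.insert (PySem.List.pyGetD entry 0 "")
        ((buildIndexB wl).getD (PySem.List.sorted (PySem.List.pyGetD entry 0 "").toList (fun c => c)) []))
      PySem.Dict.empty)).keys.Nodup := by
    rw [← final_keys_eq]
    exact final_keys_nodupA wl
  rw [PySem.Dict.items_eq_map_keys _ (final_keys_nodupA wl) ([] : List String),
      PySem.Dict.items_eq_map_keys _ hB ([] : List String), ← final_keys_eq]
  apply List.map_congr_left
  intro k _
  rw [final_getD_eq]
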